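-- pv_equiv track=rewrite | github.com/tachyon83/code-rhino | DAY001~099/DAY78-Programmers-모의고사/smlee.py | solution
-- ===== SOURCE A (Python) =====
-- def solution(answers):
--     no_1 = [1, 2, 3, 4, 5]
--     no_2 = [2, 1, 2, 3, 2, 4, 2, 5]
--     no_3 = [3, 3, 1, 1, 2, 2, 4, 4, 5, 5]
--     cnt = [0, 0, 0]
--
--     for i in range(len(answers)) :
--         if no_1[i %len(no_1)] == answers[i] : # 순환주기
--             cnt[0] += 1
--         if no_2[i %len(no_2)] == answers[i] :
--             cnt[1] += 1
--         if no_3[i %len(no_3)] == answers[i] :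
--             cnt[2] += 1
--     return [i+1 for i, j in enumerate(cnt) if j == max(cnt)]
-- ===== SOURCE B (Python) =====
-- def solution(answers):
--     patterns = [[1, 2, 3, 4, 5],
--                 [2, 1, 2, 3, 2, 4, 2, 5],
--                 [3, 3, 1, 1, 2, 2, 4, 4, 5, 5]]
--     # the three cycle lengths (5, 8, 10) all divide 40, so a pattern's value at
--     # position i depends only on i % 40: unroll each pattern to one period of 40
--     table = [[p[r % len(p)] for r in range(40)] for p in patterns]
--     # one pass: histogram of (position mod 40, answer) pairs
--     freq = {}
--     for i, a in enumerate(answers):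
--         key = (i % 40, a)
--         freq[key] = freq.get(key, 0) + 1
--     # each score is 40 histogram lookups, no rescan of the answers
--     scores = [sum(freq.get((r, v), 0) for r, v in enumerate(row)) for row in table]
--     best = max(scores)
--     return [k + 1 for k, s in enumerate(scores) if s == best]
-- ===== Notes on version B (the rewrite author's own statement) =====
-- stated objective: alternative
-- what changed: Instead of A's single loop that compares every answer against each pattern via modular indexing with three counters, B unrolls each pattern to its period-40 row (lcm of the cycle lengths divides 40), builds a histogram dict keyed by (index mod 40, answer) in one pass, and computes each pattern's score as 40 histogram lookups.
import Mathlib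
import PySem

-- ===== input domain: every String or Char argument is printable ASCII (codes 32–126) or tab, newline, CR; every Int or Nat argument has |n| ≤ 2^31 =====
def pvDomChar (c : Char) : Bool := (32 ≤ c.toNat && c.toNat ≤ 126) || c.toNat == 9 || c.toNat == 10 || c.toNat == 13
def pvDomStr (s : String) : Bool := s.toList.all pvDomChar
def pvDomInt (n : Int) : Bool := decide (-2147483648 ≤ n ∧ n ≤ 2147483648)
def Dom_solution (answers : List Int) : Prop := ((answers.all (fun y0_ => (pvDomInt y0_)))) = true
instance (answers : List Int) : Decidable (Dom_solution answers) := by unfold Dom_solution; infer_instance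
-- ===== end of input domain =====

-- B replaces A's single loop (modular pattern indexing with three interleaved counters) by a
-- period-40 unrolling of the patterns plus a one-pass histogram of (index mod 40, answer) pairs,
-- scoring each pattern with 40 histogram lookups (alternative algorithm, same asymptotic cost).

-- ===== PORT A =====
-- one pass over the indices; three counters, pattern looked up by i % len (always in range,
-- so the pyGetD default 0 is never used)
def solution (answers : List Int) : List Int :=
  let no1 : List Int := [1, 2, 3, 4, 5]
  let no2 : List Int := [2, 1, 2, 3, 2, 4, 2, 5]
  let no3 : List Int := [3, 3, 1, 1, 2, 2, 4, 4, 5, 5]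
  let cnt :=
    (PySem.List.pyRange 0 (answers.length : Int) 1).foldl
      (fun (c : Int × Int × Int) i =>
        let a := PySem.List.pyGetD answers i 0
        ( (if PySem.List.pyGetD no1 (PySem.Int.mod i (no1.length : Int)) 0 = a then c.1 + 1 else c.1),
          (if PySem.List.pyGetD no2 (PySem.Int.mod i (no2.length : Int)) 0 = a then c.2.1 + 1 else c.2.1),
          (if PySem.List.pyGetD no3 (PySem.Int.mod i (no3.length : Int)) 0 = a then c.2.2 + 1 else c.2.2) ))
      (0, 0, 0)
  let cntL : List Int := [cnt.1, cnt.2.1, cnt.2.2]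
  (PySem.List.enumerate cntL 0).foldl
    (fun acc p =>
      if p.2 = (PySem.List.max? cntL (fun x => x)).getD 0 then acc ++ [p.1 + 1] else acc) []

-- ===== PORT B =====
-- unroll each pattern to its period-40 row, histogram the (i % 40, answer) pairs once
-- (dict with get-default 0 and overwrite = PySem.Dict.insert/getD), then 40 lookups per row
def solution_alt (answers : List Int) : List Int :=
  let patterns : List (List Int) :=
    [[1, 2, 3, 4, 5], [2, 1, 2, 3, 2, 4, 2, 5], [3, 3, 1, 1, 2, 2, 4, 4, 5, 5]]
  let table := patterns.map (fun p =>
    (PySem.List.pyRange 0 40 1).map (fun r => PySem.List.pyGetD p (PySem.Int.mod r (p.length : Int)) 0))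
  let freq := (PySem.List.enumerate answers 0).foldl
    (fun (d : PySem.Dict (Int × Int) Int) pr =>
      let key := (PySem.Int.mod pr.1 40, pr.2)
      d.insert key (d.getD key 0 + 1)) PySem.Dict.empty
  let scores := table.map (fun row =>
    (PySem.List.enumerate row 0).foldl (fun s pr => s + freq.getD (pr.1, pr.2) 0) 0)
  let best := (PySem.List.max? scores (fun x => x)).getD 0
  (PySem.List.enumerate scores 0).foldl
    (fun acc p => if p.2 = best then acc ++ [p.1 + 1] else acc) []

-- ===== PRECONDITION & SPEC =====
def Spec_solution (answers : List Int) (out : List Int) : Prop := out = solution_alt answers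
instance (answers : List Int) (out : List Int) : Decidable (Spec_solution answers out) := by unfold Spec_solution; infer_instance

-- ===== CLAIM (what is proved, stated in full; the proofs are below) =====
def Claim_equal_solution : Prop := ∀ (answers : List Int), Dom_solution answers → Spec_solution answers (solution answers)

-- ===== LEMMAS AND PROOFS =====

-- taking i mod 40 first does not change i mod L when L divides 40
theorem mod40_mod (L : Int) (hL : 0 < L) (hdvd : L ∣ 40) (i : Int) :
    PySem.Int.mod (PySem.Int.mod i 40) L = PySem.Int.mod i L := by
  rw [PySem.Int.mod_eq_emod_of_pos (by norm_num : (0:Int) < 40),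
      PySem.Int.mod_eq_emod_of_pos hL, PySem.Int.mod_eq_emod_of_pos hL]
  exact Int.emod_emod_of_dvd i hdvd

-- summing the indicator 'this residue class is r' over all residues r yields one hit
theorem sum_ind (f : Int → Int) (m v : Int) :
    ∀ (R : List Int), R.Nodup → m ∈ R →
      (R.map (fun r => if ((m, v) : Int × Int) == (r, f r) then (1 : Int) else 0)).sum
        = if f m = v then 1 else 0 := by
  intro R
  induction R with
  | nil => intro _ h; cases h
  | cons r0 R ih =>
    intro hnd hm
    rw [List.map_cons, List.sum_cons]
    by_cases h : r0 = m
    · subst h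
      have hzero : (R.map (fun r => if ((r0, v) : Int × Int) == (r, f r) then (1 : Int) else 0)).sum = 0 := by
        apply List.sum_eq_zero
        intro x hx
        obtain ⟨r, hr, hrx⟩ := List.mem_map.mp hx
        have hne : r0 ≠ r := fun he => (List.nodup_cons.mp hnd).1 (he ▸ hr)
        simp [Prod.ext_iff, hne] at hrx
        omega
      rw [hzero, add_zero]
      by_cases hv : f r0 = v
      · subst hv; simp
      · have hne2 : ¬ (((r0, v) : Int × Int) == (r0, f r0)) = true := by
          simp [Prod.ext_iff]
          exact fun he => hv he.symm
        rw [if_neg hne2, if_neg hv]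
    · have hm' : m ∈ R := by
        cases List.mem_cons.mp hm with
        | inl he => exact absurd he.symm h
        | inr h' => exact h'
      have hne : ¬ (((m, v) : Int × Int) == (r0, f r0)) = true := by
        simp [Prod.ext_iff]; intro he; exact absurd he.symm h
      rw [if_neg hne, ih (List.nodup_cons.mp hnd).2 hm', zero_add]

-- the 40 histogram lookups for the unrolled row of f count exactly the matches of f
theorem sum_counts (f : Int → Int) :
    ∀ (l : List (Int × Int)),
      ((PySem.List.pyRange 0 40 1).map
          (fun r => ((l.map (fun q => (PySem.Int.mod q.1 40, q.2))).count (r, f r) : Int))).sum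
        = (l.countP (fun q => decide (f (PySem.Int.mod q.1 40) = q.2)) : Int) := by
  intro l
  induction l with
  | nil => simp
  | cons x l ih =>
    have hcount : ∀ r : Int,
        ((((x :: l).map (fun q => (PySem.Int.mod q.1 40, q.2))).count (r, f r) : Int))
          = ((l.map (fun q => (PySem.Int.mod q.1 40, q.2))).count (r, f r) : Int)
            + (if ((PySem.Int.mod x.1 40, x.2) : Int × Int) == (r, f r) then (1 : Int) else 0) := by
      intro r
      rw [List.map_cons, List.count_cons]
      push_cast
      split <;> simp
    calc ((PySem.List.pyRange 0 40 1).map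
            (fun r => (((x :: l).map (fun q => (PySem.Int.mod q.1 40, q.2))).count (r, f r) : Int))).sum
        = ((PySem.List.pyRange 0 40 1).map
            (fun r => ((l.map (fun q => (PySem.Int.mod q.1 40, q.2))).count (r, f r) : Int)
              + (if ((PySem.Int.mod x.1 40, x.2) : Int × Int) == (r, f r) then (1 : Int) else 0))).sum := by
          exact congrArg List.sum (List.map_congr_left (fun r _ => hcount r))
      _ = ((PySem.List.pyRange 0 40 1).map
            (fun r => ((l.map (fun q => (PySem.Int.mod q.1 40, q.2))).count (r, f r) : Int))).sum
          + ((PySem.List.pyRange 0 40 1).map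
            (fun r => (if ((PySem.Int.mod x.1 40, x.2) : Int × Int) == (r, f r) then (1 : Int) else 0))).sum := by
          rw [PySem.List.sum_map_add_int]
      _ = ((x :: l).countP (fun q => decide (f (PySem.Int.mod q.1 40) = q.2)) : Int) := by
          rw [ih, sum_ind f (PySem.Int.mod x.1 40) x.2 (PySem.List.pyRange 0 40 1)
                (by decide)
                (by rw [PySem.List.mem_pyRange_one]
                    exact ⟨PySem.Int.mod_nonneg _ (by norm_num), PySem.Int.mod_lt _ (by norm_num)⟩)]
          rw [List.countP_cons]
          push_cast [List.countP_cons]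
          split_ifs with h1 h2 h3 <;> simp_all

-- the histogram loop (dict get-default + overwrite) builds the Counter of the (i mod 40, answer) keys
theorem freq_eq (answers : List Int) :
    (PySem.List.enumerate answers 0).foldl
        (fun (d : PySem.Dict (Int × Int) Int) pr =>
          d.insert (PySem.Int.mod pr.1 40, pr.2) (d.getD (PySem.Int.mod pr.1 40, pr.2) 0 + 1))
        PySem.Dict.empty
      = PySem.Dict.counter ((PySem.List.enumerate answers 0).map (fun q => (PySem.Int.mod q.1 40, q.2))) := by
  rw [← PySem.Dict.foldl_insert_getD_add_one_eq_counter, List.foldl_map]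

-- B's 40 lookups for one unrolled pattern row count A's matches for that pattern
theorem scoreB_gen (answers : List Int) (p : List Int) (L : Int)
    (hrow : PySem.List.enumerate
          ((PySem.List.pyRange 0 40 1).map (fun r => PySem.List.pyGetD p (PySem.Int.mod r L) 0)) 0
        = (PySem.List.pyRange 0 40 1).map (fun r => (r, PySem.List.pyGetD p (PySem.Int.mod r L) 0)))
    (hmod : ∀ i, PySem.Int.mod (PySem.Int.mod i 40) L = PySem.Int.mod i L) :
    (PySem.List.enumerate
        ((PySem.List.pyRange 0 40 1).map (fun r => PySem.List.pyGetD p (PySem.Int.mod r L) 0)) 0).foldl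
        (fun s pr => s +
          (PySem.Dict.counter ((PySem.List.enumerate answers 0).map
            (fun q => (PySem.Int.mod q.1 40, q.2)))).getD (pr.1, pr.2) 0) 0
      = ((PySem.List.enumerate answers 0).countP
          (fun q => decide (PySem.List.pyGetD p (PySem.Int.mod q.1 L) 0 = q.2)) : Int) := by
  rw [hrow, PySem.List.foldl_add, List.map_map, zero_add]
  dsimp only [Function.comp_def]
  simp only [PySem.Dict.getD_counter]
  rw [sum_counts (fun r => PySem.List.pyGetD p (PySem.Int.mod r L) 0) (PySem.List.enumerate answers 0)]
  simp only [hmod]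

-- A's three interleaved counters are the three per-pattern match counts
theorem cntA (answers : List Int) :
    (PySem.List.pyRange 0 (answers.length : Int) 1).foldl
        (fun (c : Int × Int × Int) i =>
          ( (if PySem.List.pyGetD [1,2,3,4,5] (PySem.Int.mod i (([1,2,3,4,5] : List Int).length : Int)) 0 = PySem.List.pyGetD answers i 0 then c.1 + 1 else c.1),
            (if PySem.List.pyGetD [2,1,2,3,2,4,2,5] (PySem.Int.mod i (([2,1,2,3,2,4,2,5] : List Int).length : Int)) 0 = PySem.List.pyGetD answers i 0 then c.2.1 + 1 else c.2.1),
            (if PySem.List.pyGetD [3,3,1,1,2,2,4,4,5,5] (PySem.Int.mod i (([3,3,1,1,2,2,4,4,5,5] : List Int).length : Int)) 0 = PySem.List.pyGetD answers i 0 then c.2.2 + 1 else c.2.2) ))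
        (0, 0, 0)
      = (((PySem.List.enumerate answers 0).countP (fun q => decide (PySem.List.pyGetD [1,2,3,4,5] (PySem.Int.mod q.1 (([1,2,3,4,5] : List Int).length : Int)) 0 = q.2)) : Int),
         ((PySem.List.enumerate answers 0).countP (fun q => decide (PySem.List.pyGetD [2,1,2,3,2,4,2,5] (PySem.Int.mod q.1 (([2,1,2,3,2,4,2,5] : List Int).length : Int)) 0 = q.2)) : Int),
         ((PySem.List.enumerate answers 0).countP (fun q => decide (PySem.List.pyGetD [3,3,1,1,2,2,4,4,5,5] (PySem.Int.mod q.1 (([3,3,1,1,2,2,4,4,5,5] : List Int).length : Int)) 0 = q.2)) : Int)) := by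
  have henum : PySem.List.enumerate answers 0
      = (PySem.List.pyRange 0 (answers.length : Int) 1).map
          (fun j => (j, PySem.List.pyGetD answers j 0)) := by
    simpa [PySem.List.len] using
      PySem.List.enumerate_eq_map_pyRange (xs := answers) (d := (0 : Int))
  rw [show (PySem.List.pyRange 0 (answers.length : Int) 1).foldl
        (fun (c : Int × Int × Int) i =>
          ( (if PySem.List.pyGetD [1,2,3,4,5] (PySem.Int.mod i (([1,2,3,4,5] : List Int).length : Int)) 0 = PySem.List.pyGetD answers i 0 then c.1 + 1 else c.1),
            (if PySem.List.pyGetD [2,1,2,3,2,4,2,5] (PySem.Int.mod i (([2,1,2,3,2,4,2,5] : List Int).length : Int)) 0 = PySem.List.pyGetD answers i 0 then c.2.1 + 1 else c.2.1),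
            (if PySem.List.pyGetD [3,3,1,1,2,2,4,4,5,5] (PySem.Int.mod i (([3,3,1,1,2,2,4,4,5,5] : List Int).length : Int)) 0 = PySem.List.pyGetD answers i 0 then c.2.2 + 1 else c.2.2) ))
        (0, 0, 0)
      = (PySem.List.enumerate answers 0).foldl
        (fun (c : Int × Int × Int) pr =>
          ( (if PySem.List.pyGetD [1,2,3,4,5] (PySem.Int.mod pr.1 (([1,2,3,4,5] : List Int).length : Int)) 0 = pr.2 then c.1 + 1 else c.1),
            (if PySem.List.pyGetD [2,1,2,3,2,4,2,5] (PySem.Int.mod pr.1 (([2,1,2,3,2,4,2,5] : List Int).length : Int)) 0 = pr.2 then c.2.1 + 1 else c.2.1),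
            (if PySem.List.pyGetD [3,3,1,1,2,2,4,4,5,5] (PySem.Int.mod pr.1 (([3,3,1,1,2,2,4,4,5,5] : List Int).length : Int)) 0 = pr.2 then c.2.2 + 1 else c.2.2) ))
        (0, 0, 0) from by rw [henum, List.foldl_map],
      PySem.List.foldl_prod_mk
        (f := fun (c : Int) (pr : Int × Int) => if PySem.List.pyGetD [1,2,3,4,5] (PySem.Int.mod pr.1 (([1,2,3,4,5] : List Int).length : Int)) 0 = pr.2 then c + 1 else c)
        (g := fun (c : Int × Int) (pr : Int × Int) =>
          ( (if PySem.List.pyGetD [2,1,2,3,2,4,2,5] (PySem.Int.mod pr.1 (([2,1,2,3,2,4,2,5] : List Int).length : Int)) 0 = pr.2 then c.1 + 1 else c.1),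
            (if PySem.List.pyGetD [3,3,1,1,2,2,4,4,5,5] (PySem.Int.mod pr.1 (([3,3,1,1,2,2,4,4,5,5] : List Int).length : Int)) 0 = pr.2 then c.2 + 1 else c.2) )),
      PySem.List.foldl_prod_mk
        (f := fun (c : Int) (pr : Int × Int) => if PySem.List.pyGetD [2,1,2,3,2,4,2,5] (PySem.Int.mod pr.1 (([2,1,2,3,2,4,2,5] : List Int).length : Int)) 0 = pr.2 then c + 1 else c)
        (g := fun (c : Int) (pr : Int × Int) => if PySem.List.pyGetD [3,3,1,1,2,2,4,4,5,5] (PySem.Int.mod pr.1 (([3,3,1,1,2,2,4,4,5,5] : List Int).length : Int)) 0 = pr.2 then c + 1 else c),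
      PySem.List.foldl_ite_add_one, PySem.List.foldl_ite_add_one, PySem.List.foldl_ite_add_one]
  simp

-- ===== VERDICT (by name: the statement is the Claim_ definition above) =====
theorem solution_spec : Claim_equal_solution := by
  intro answers _
  unfold Spec_solution
  simp only [solution, solution_alt, List.map]
  simp only [freq_eq answers, cntA answers,
      scoreB_gen answers [1,2,3,4,5] (([1,2,3,4,5] : List Int).length : Int) (by decide)
        (fun i => mod40_mod _ (by decide) (by decide) i),
      scoreB_gen answers [2,1,2,3,2,4,2,5] (([2,1,2,3,2,4,2,5] : List Int).length : Int) (by decide)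
        (fun i => mod40_mod _ (by decide) (by decide) i),
      scoreB_gen answers [3,3,1,1,2,2,4,4,5,5] (([3,3,1,1,2,2,4,4,5,5] : List Int).length : Int) (by decide)
        (fun i => mod40_mod _ (by decide) (by decide) i)]
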